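-- pv_equiv track=rewrite | github.com/Lattice-Automation/primers | primers/off_targets.py | off_targets
-- ===== SOURCE A (Python) =====
-- from collections import defaultdict
-- from typing import List, Dict
--
-- def off_targets(seq: str, check_seq: str) -> List[int]:
--     """Return a list of off-target counts for primers that end is that index.
--
--     For example, offtarget_cache[20] -> returns the number of offtarget binding
--     sites whose last bp ends in the 20th index of `seq`
--
--     Args:
--         seq: The template sequence being checked
--         check_seq: The sequence being checked for offtarget binding sites
--
--     Returns:
--         List[int]: A list of binding site counts for primers whose last
--             bp is within that index of the list
--     """
--
--     check_map: Dict[str, int] = defaultdict(int)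
--     mutate_map = {"A": "TGC", "T": "AGC", "G": "ATC", "C": "ATG"}
--
--     def mutate(s: str) -> List[str]:
--         mutated_sites = [s]
--         for i, c in enumerate(s):
--             for m in mutate_map[c]:
--                 mutated_sites.append(s[:i] + m + s[i + 1 :])
--         return mutated_sites
--
--     for s in range(len(check_seq) - 9):
--         for m in mutate(check_seq[s : s + 10]):
--             check_map[m] += 1
--
--     cache: List[int] = [0] * len(seq)
--     for e in range(10, len(seq) + 1):
--         ss = seq[e - 10 : e]
--
--         # assumed to bind at least once
--         cache[e - 1] = max(0, check_map[ss] + check_map[_rc(ss)] - 1)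
--     return cache
--
-- def _rc(seq: str) -> str:
--     """Return the reverse complement of a DNA sequence.
--
--     Args:
--         seq: The template sequence
--
--     Returns:
--         str: The reverse complement of the template sequence
--     """
--
--     rc = {"A": "T", "T": "A", "G": "C", "C": "G"}
--     return "".join(rc[c] for c in reversed(seq))
-- ===== SOURCE B (Python) =====
-- from collections import Counter
--
-- def off_targets(seq, check_seq):
--     """Count near-match (Hamming<=1) 10-mer off-target sites per end index.
--
--     B builds a plain Counter of check_seq's exact 10-mers once, then for each
--     query window enumerates its Hamming<=1 neighbourhood (and its reverse
--     complement's) RECURSIVELY and sums exact counts; no defaultdict of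
--     expanded variants and no in-place cache mutation.
--     """
--     windows = [check_seq[i : i + 10] for i in range(len(check_seq) - 9)]
--     exact = Counter(windows)
--
--     others = {"A": "TGC", "T": "AGC", "G": "ATC", "C": "ATG"}
--
--     def near(s):
--         # all strings at Hamming distance <= 1 from s, each exactly once
--         if not s:
--             return [""]
--         head, rest = s[0], s[1:]
--         return [m + rest for m in others[head]] + [head + t for t in near(rest)]
--
--     comp = {"A": "T", "T": "A", "G": "C", "C": "G"}
--
--     def rc(s):
--         if not s:
--             return ""
--         return rc(s[1:]) + comp[s[0]]
--
--     def score(ss):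
--         total = sum(exact[v] for v in near(ss)) \
--               + sum(exact[v] for v in near(rc(ss)))
--         return max(0, total - 1)
--
--     return [score(seq[e - 10 : e]) if e >= 10 else 0
--             for e in range(1, len(seq) + 1)]
-- ===== Notes on version B (the rewrite author's own statement) =====
-- stated objective: alternative
-- what changed: B replaces A's defaultdict of pre-expanded variants and in-place cache mutation with a plain Counter of the exact 10-mers, a recursive Hamming<=1 neighbourhood generator and a recursive reverse-complement applied at query time, producing the result as a single list comprehension; A expands every check_seq window into 31 variants while building the map, then does one dict lookup per query into a mutated cache list.
import Mathlib
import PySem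

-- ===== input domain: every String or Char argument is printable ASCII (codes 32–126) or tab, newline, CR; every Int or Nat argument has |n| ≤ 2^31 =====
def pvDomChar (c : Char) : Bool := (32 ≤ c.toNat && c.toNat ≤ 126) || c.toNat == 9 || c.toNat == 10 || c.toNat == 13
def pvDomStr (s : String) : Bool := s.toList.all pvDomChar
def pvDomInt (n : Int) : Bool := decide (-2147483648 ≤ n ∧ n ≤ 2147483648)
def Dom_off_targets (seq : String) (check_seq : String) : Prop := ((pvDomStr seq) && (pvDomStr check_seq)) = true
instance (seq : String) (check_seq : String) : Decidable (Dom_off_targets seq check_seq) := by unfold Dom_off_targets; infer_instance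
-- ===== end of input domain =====

-- B replaces A's defaultdict of pre-expanded variants and in-place cache mutation with a
-- plain Counter of the exact 10-mers, a recursive Hamming≤1 neighbourhood generator and a
-- recursive reverse complement applied at query time, emitting the result as one list
-- comprehension (objective: alternative).

-- ===== PORT A =====
-- mutate_map[c]: Python raises KeyError on a char outside "ATGC"; those inputs are
-- excluded by Pre_; the [] default here is exact on Pre_.
def pvMutOf (c : Char) : List Char :=
  if c = 'A' then ['T', 'G', 'C']
  else if c = 'T' then ['A', 'G', 'C']
  else if c = 'G' then ['A', 'T', 'C']
  else if c = 'C' then ['A', 'T', 'G'] else []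

-- A's inner `mutate` helper
def pvMutate (s : List Char) : List (List Char) :=
  (PySem.List.enumerate s 0).foldl
    (fun acc ic =>
      (pvMutOf ic.2).foldl
        (fun acc2 m =>
          acc2 ++ [PySem.List.slice s none (some ic.1) ++ [m] ++
                   PySem.List.slice s (some (ic.1 + 1)) none]) acc)
    [s]

-- _rc: Python raises KeyError outside "ATGC" (excluded by Pre_); identity default here.
def pvRC (s : List Char) : List Char :=
  s.reverse.map (fun c =>
    if c = 'A' then 'T' else if c = 'T' then 'A'
    else if c = 'G' then 'C' else if c = 'C' then 'G' else c)

def off_targets (seq : String) (check_seq : String) : List Int :=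
  let cl := check_seq.toList
  let sl := seq.toList
  let check_map : PySem.Dict (List Char) Int :=
    (PySem.List.pyRange 0 ((cl.length : Int) - 9) 1).foldl
      (fun d s =>
        (pvMutate (PySem.List.slice cl (some s) (some (s + 10)))).foldl
          (fun d m => d.modify m 0 (· + 1)) d)
      PySem.Dict.empty
  let cache : List Int := List.replicate sl.length 0
  (PySem.List.pyRange 10 ((sl.length : Int) + 1) 1).foldl
    (fun cache e =>
      let ss := PySem.List.slice sl (some (e - 10)) (some e)
      PySem.List.pySetD cache (e - 1)
        (max 0 (check_map.getD ss 0 + check_map.getD (pvRC ss) 0 - 1)))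
    cache

-- ===== PORT B =====
-- others[head]: KeyError outside "ATGC" in Python, excluded by Pre_; [] default is exact there.
def pvOthersB : Char → List Char
  | 'A' => ['T', 'G', 'C']
  | 'T' => ['A', 'G', 'C']
  | 'G' => ['A', 'T', 'C']
  | 'C' => ['A', 'T', 'G']
  | _   => []

-- B's recursive `near`: the Hamming≤1 neighbourhood, each string exactly once
def pvNear : List Char → List (List Char)
  | [] => [[]]
  | head :: rest =>
      (pvOthersB head).map (fun m => m :: rest) ++ (pvNear rest).map (fun t => head :: t)

-- comp[c]: KeyError outside "ATGC" in Python, excluded by Pre_; identity default is exact there.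
def pvCompB : Char → Char
  | 'A' => 'T'
  | 'T' => 'A'
  | 'G' => 'C'
  | 'C' => 'G'
  | c   => c

-- B's recursive `rc`
def pvRCB : List Char → List Char
  | [] => []
  | c :: rest => pvRCB rest ++ [pvCompB c]

-- Counter(windows)[v] is windows.count v
def off_targets_alt (seq : String) (check_seq : String) : List Int :=
  let cl := check_seq.toList
  let sl := seq.toList
  let windows : List (List Char) :=
    (PySem.List.pyRange 0 ((cl.length : Int) - 9) 1).map
      (fun i => PySem.List.slice cl (some i) (some (i + 10)))
  let score : List Char → Int := fun ss =>
    max 0 (((pvNear ss).map (fun v => ((windows.count v : Nat) : Int))).sum +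
           ((pvNear (pvRCB ss)).map (fun v => ((windows.count v : Nat) : Int))).sum - 1)
  (PySem.List.pyRange 1 ((sl.length : Int) + 1) 1).map
    (fun e => if 10 ≤ e then score (PySem.List.slice sl (some (e - 10)) (some e)) else 0)

-- ===== PRECONDITION & SPEC =====
def pvBase (c : Char) : Bool := c = 'A' || c = 'T' || c = 'G' || c = 'C'

-- A raises KeyError iff a string of length ≥ 10 contains a character outside "ATGC"
-- (every character then lies in some 10-mer window); Pre_ excludes exactly those inputs.
def Pre_off_targets (seq : String) (check_seq : String) : Prop :=
  (check_seq.toList.length < 10 ∨ check_seq.toList.all pvBase = true) ∧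
  (seq.toList.length < 10 ∨ seq.toList.all pvBase = true)
instance (seq : String) (check_seq : String) : Decidable (Pre_off_targets seq check_seq) := by
  unfold Pre_off_targets; infer_instance

def pvWitness_off_targets : String × String := ("ACGTACGTACGT", "ACGTTACGTTAC")

def Spec_off_targets (seq : String) (check_seq : String) (out : List Int) : Prop := out = off_targets_alt seq check_seq
instance (seq : String) (check_seq : String) (out : List Int) : Decidable (Spec_off_targets seq check_seq out) := by unfold Spec_off_targets; infer_instance

-- ===== CLAIM (what is proved, stated in full; the proofs are below) =====
def Claim_equal_off_targets : Prop := ∀ (seq : String) (check_seq : String), Dom_off_targets seq check_seq → Pre_off_targets seq check_seq → Spec_off_targets seq check_seq (off_targets seq check_seq)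

-- ===== LEMMAS AND PROOFS =====

theorem pvMutate_eq (s : List Char) :
    pvMutate s = s :: (PySem.List.enumerate s 0).flatMap
      (fun ic => (pvMutOf ic.2).map (fun m =>
        PySem.List.slice s none (some ic.1) ++ [m] ++
        PySem.List.slice s (some (ic.1 + 1)) none)) := by
  unfold pvMutate
  rw [PySem.List.foldl_congr_mem _ _ (fun acc ic => acc ++ (pvMutOf ic.2).map (fun m =>
        PySem.List.slice s none (some ic.1) ++ [m] ++
        PySem.List.slice s (some (ic.1 + 1)) none)) _
      (by intro acc ic _; rw [PySem.List.foldl_append_singleton_eq_map])]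
  rw [PySem.List.foldl_append_eq_flatMap]
  rfl

theorem mem_pvMutOf {c m : Char} :
    m ∈ pvMutOf c ↔ pvBase c = true ∧ pvBase m = true ∧ m ≠ c := by
  unfold pvMutOf pvBase
  split_ifs with h1 h2 h3 h4 <;> subst_vars <;>
    by_cases hA : m = 'A' <;> by_cases hT : m = 'T' <;>
    by_cases hG : m = 'G' <;> by_cases hC : m = 'C' <;> subst_vars <;> simp_all

theorem ne_of_mem_pvMutOf {c m : Char} (h : m ∈ pvMutOf c) : m ≠ c :=
  (mem_pvMutOf.1 h).2.2
theorem nodup_pvMutOf (c : Char) : (pvMutOf c).Nodup := by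
  unfold pvMutOf; split_ifs <;> decide

theorem sub_eq_set {s : List Char} {k : Nat} (hk : k < s.length) (m : Char) :
    PySem.List.slice s none (some ((0 : Int) + k)) ++ [m] ++
      PySem.List.slice s (some (((0 : Int) + k) + 1)) none = s.set k m := by
  have h1 : ((0 : Int) + (k : Nat)) = ((k : Nat) : Int) := by ring
  have h2 : (((k : Nat) : Int) + 1) = (((k + 1 : Nat)) : Int) := by push_cast; ring
  rw [h1, h2, PySem.List.slice_to_natCast, PySem.List.slice_from_natCast]
  rw [List.set_eq_take_append_cons_drop, if_pos hk]
  simp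

theorem eq_getElem_of_set_eq {s : List Char} {k : Nat} {m : Char}
    (hk : k < s.length) (heq : s.set k m = s) : m = s[k] := by
  have h1 : (s.set k m)[k]? = some m := List.getElem?_set_self hk
  rw [heq, List.getElem?_eq_getElem hk] at h1
  exact (Option.some.inj h1).symm

theorem set_inj_at {s : List Char} {k : Nat} {x y : Char}
    (hk : k < s.length) (h : s.set k x = s.set k y) : x = y := by
  have h1 : (s.set k x)[k]? = some x := List.getElem?_set_self hk
  rw [h, List.getElem?_set_self hk] at h1
  exact (Option.some.inj h1).symm

theorem set_eq_set_ne_pos {s : List Char} {k j : Nat} {x y : Char}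
    (hk : k < s.length) (hkj : k ≠ j) (h : s.set k x = s.set j y) : x = s[k] := by
  have h1 : (s.set k x)[k]? = some x := List.getElem?_set_self hk
  rw [h, List.getElem?_set_ne (fun hh => hkj hh.symm), List.getElem?_eq_getElem hk] at h1
  exact (Option.some.inj h1).symm

theorem mem_pvMutate {s t : List Char} :
    t ∈ pvMutate s ↔ t = s ∨ ∃ k, ∃ _ : k < s.length, ∃ m ∈ pvMutOf s[k], t = s.set k m := by
  rw [pvMutate_eq]
  simp only [List.mem_cons, List.mem_flatMap, PySem.List.mem_enumerate_iff, List.mem_map]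
  constructor
  · rintro (rfl | ⟨ic, ⟨k, hk, rfl⟩, m, hm, heq⟩)
    · exact Or.inl rfl
    · exact Or.inr ⟨k, hk, m, hm, Eq.trans heq.symm (sub_eq_set hk m)⟩
  · rintro (rfl | ⟨k, hk, m, hm, rfl⟩)
    · exact Or.inl rfl
    · exact Or.inr ⟨(0 + (k : Int), s[k]), ⟨k, hk, rfl⟩, m, hm, sub_eq_set hk m⟩

theorem nodup_pvMutate (s : List Char) : (pvMutate s).Nodup := by
  rw [pvMutate_eq]
  refine List.Nodup.cons ?_ ?_
  · intro hmem
    simp only [List.mem_flatMap, PySem.List.mem_enumerate_iff, List.mem_map] at hmem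
    obtain ⟨ic, ⟨k, hk, rfl⟩, m, hm, heq⟩ := hmem
    have heq' : s.set k m = s := Eq.trans (sub_eq_set hk m).symm heq
    exact (ne_of_mem_pvMutOf hm) (eq_getElem_of_set_eq hk heq')
  · rw [List.nodup_flatMap]
    constructor
    · rintro ⟨i, c⟩ hic
      simp only [PySem.List.mem_enumerate_iff] at hic
      obtain ⟨k, hk, heq⟩ := hic
      obtain ⟨rfl, rfl⟩ : i = 0 + (k : Int) ∧ c = s[k] := by
        refine ⟨congrArg Prod.fst heq, congrArg Prod.snd heq⟩
      refine List.Nodup.map_on ?_ (nodup_pvMutOf _)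
      intro x _ y _ hxy
      have hxy' : s.set k x = s.set k y :=
        Eq.trans (Eq.trans (sub_eq_set hk x).symm hxy) (sub_eq_set hk y)
      exact set_inj_at hk hxy'
    · refine (PySem.List.pairwise_lt_enumerate s 0).imp_of_mem ?_
      rintro p q hp hq hlt
      simp only [PySem.List.mem_enumerate_iff] at hp hq
      obtain ⟨k, hk, rfl⟩ := hp
      obtain ⟨j, hj, rfl⟩ := hq
      have hkj : k ≠ j := by
        intro h; subst h; simp at hlt
      intro u hu hu'
      simp only [List.mem_map] at hu hu'
      obtain ⟨x, hx, hux⟩ := hu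
      obtain ⟨y, hy, huy⟩ := hu'
      have heq : s.set k x = s.set j y :=
        Eq.trans (Eq.trans (sub_eq_set hk x).symm (Eq.trans hux huy.symm)) (sub_eq_set hj y)
      exact (ne_of_mem_pvMutOf hx) (set_eq_set_ne_pos hk hkj heq)

theorem mem_pvMutate_symm {s t : List Char} (hs : s.all pvBase = true)
    (ht : t.all pvBase = true) (h : t ∈ pvMutate s) : s ∈ pvMutate t := by
  rw [mem_pvMutate] at h ⊢
  rcases h with rfl | ⟨k, hk, m, hm, rfl⟩
  · exact Or.inl rfl
  · right
    have hlen : (s.set k m).length = s.length := List.length_set ..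
    refine ⟨k, by omega, s[k], ?_, ?_⟩
    · rw [mem_pvMutOf]
      obtain ⟨_, hbm, hne⟩ := mem_pvMutOf.1 hm
      have hk' : (s.set k m)[k]'(by omega) = m := List.getElem_set_self (by omega)
      have hbk : pvBase s[k] = true := by
        rw [List.all_eq_true] at hs; exact hs _ (List.getElem_mem hk)
      rw [hk']
      exact ⟨hbm, hbk, fun hh => hne hh.symm⟩
    · have : (s.set k m).set k (s[k]'hk) = s.set k (s[k]'hk) := List.set_set ..
      rw [this, List.set_getElem_self]

theorem count_pvMutate_symm {s t : List Char} (hs : s.all pvBase = true)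
    (ht : t.all pvBase = true) : (pvMutate s).count t = (pvMutate t).count s := by
  by_cases h : t ∈ pvMutate s
  · rw [List.count_eq_one_of_mem (nodup_pvMutate s) h,
        List.count_eq_one_of_mem (nodup_pvMutate t) (mem_pvMutate_symm hs ht h)]
  · rw [List.count_eq_zero_of_not_mem h, List.count_eq_zero_of_not_mem
      (fun h' => h (mem_pvMutate_symm ht hs h'))]

theorem sum_count_comm {α : Type} [BEq α] [LawfulBEq α] (V W : List α) :
    (V.map (fun v => ((W.count v : Nat) : Int))).sum =
    (W.map (fun w => ((V.count w : Nat) : Int))).sum := by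
  induction W with
  | nil => simp
  | cons w W' ih =>
    simp only [List.map_cons, List.sum_cons]
    have hstep : (V.map (fun v => (((w :: W').count v : Nat) : Int))) =
        V.map (fun v => ((if (w == v) = true then (1 : Int) else 0) +
          ((W'.count v : Nat) : Int))) := by
      refine List.map_congr_left (fun v _ => ?_)
      rw [List.count_cons]
      split_ifs <;> push_cast <;> ring
    rw [hstep, PySem.List.sum_map_add_int, ih]
    have hcnt : (V.map (fun v => if (w == v) = true then (1 : Int) else 0)).sum
        = ((V.count w : Nat) : Int) := by
      rw [PySem.List.sum_map_ite_one_zero (fun v => w == v) V]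
      congr 1
      rw [List.count_eq_countP]
      exact List.countP_congr (fun v _ => by
        rw [beq_iff_eq, beq_iff_eq]; exact eq_comm)
    rw [hcnt]

theorem getD_A_map (win : Int → List Char) (is : List Int)
    (d : PySem.Dict (List Char) Int) (m : List Char) :
    ((is.foldl (fun d s => (pvMutate (win s)).foldl (fun d x => d.modify x 0 (· + 1)) d) d).getD m 0)
      = d.getD m 0 + (is.map (fun s => (((pvMutate (win s)).count m : Nat) : Int))).sum := by
  induction is generalizing d with
  | nil => simp
  | cons s is' ih =>
    simp only [List.foldl_cons, List.map_cons, List.sum_cons]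
    rw [ih, PySem.Dict.getD_foldl_modify_add_one]
    ring

theorem all_pvBase_slice {xs : List Char} (h : xs.all pvBase = true) (a b : Option Int) :
    (PySem.List.slice xs a b).all pvBase = true := by
  rw [List.all_eq_true] at h ⊢
  exact fun x hx => h x (PySem.List.mem_of_mem_slice xs a b hx)

theorem all_pvBase_pvRC {xs : List Char} (h : xs.all pvBase = true) :
    (pvRC xs).all pvBase = true := by
  rw [List.all_eq_true] at h ⊢
  intro x hx
  unfold pvRC at hx
  simp only [List.mem_map, List.mem_reverse] at hx
  obtain ⟨c, hc, rfl⟩ := hx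
  have hbc := h c hc
  simp only [pvBase, Bool.or_eq_true, decide_eq_true_eq] at hbc
  rcases hbc with ((rfl | rfl) | rfl) | rfl <;> decide

-- ===== B-side lemmas =====

theorem pvOthersB_eq (c : Char) : pvOthersB c = pvMutOf c := by
  unfold pvOthersB pvMutOf
  split <;> simp_all

theorem pvCompB_eq (c : Char) : pvCompB c =
    (if c = 'A' then 'T' else if c = 'T' then 'A'
     else if c = 'G' then 'C' else if c = 'C' then 'G' else c) := by
  unfold pvCompB
  split <;> simp_all

theorem pvRCB_eq (s : List Char) : pvRCB s = pvRC s := by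
  induction s with
  | nil => rfl
  | cons c rest ih =>
    show pvRCB rest ++ [pvCompB c] = pvRC (c :: rest)
    simp only [pvRC] at ih ⊢
    rw [List.reverse_cons, List.map_append, ih, pvCompB_eq]
    rfl

theorem mem_pvNear {s t : List Char} :
    t ∈ pvNear s ↔ t = s ∨ ∃ k, ∃ _ : k < s.length, ∃ m ∈ pvMutOf s[k], t = s.set k m := by
  induction s generalizing t with
  | nil => simp [pvNear]
  | cons c rest ih =>
    simp only [pvNear, List.mem_append, List.mem_map, pvOthersB_eq]
    constructor
    · rintro (⟨m, hm, rfl⟩ | ⟨t', ht', rfl⟩)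
      · exact Or.inr ⟨0, by simp, m, hm, rfl⟩
      · rcases ih.1 ht' with rfl | ⟨k, hk, m, hm, rfl⟩
        · exact Or.inl rfl
        · refine Or.inr ⟨k + 1, by simpa using Nat.succ_lt_succ hk, m, ?_, rfl⟩
          simpa using hm
    · rintro (rfl | ⟨k, hk, m, hm, rfl⟩)
      · exact Or.inr ⟨rest, ih.2 (Or.inl rfl), rfl⟩
      · cases k with
        | zero => exact Or.inl ⟨m, by simpa using hm, rfl⟩
        | succ j =>
          refine Or.inr ⟨rest.set j m, ih.2 (Or.inr ⟨j, by simpa using hk, m, by simpa using hm, rfl⟩), rfl⟩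

theorem nodup_pvNear (s : List Char) : (pvNear s).Nodup := by
  induction s with
  | nil => simp [pvNear]
  | cons c rest ih =>
    show (((pvOthersB c).map (fun m => m :: rest)) ++ ((pvNear rest).map (fun t => c :: t))).Nodup
    refine List.Nodup.append ?_ ?_ ?_
    · refine List.Nodup.map ?_ (by rw [pvOthersB_eq]; exact nodup_pvMutOf c)
      intro x y hxy
      exact (List.cons.injEq ..).mp hxy |>.1
    · refine List.Nodup.map ?_ ih
      intro x y hxy
      exact (List.cons.injEq ..).mp hxy |>.2
    · intro u hu hu'
      simp only [List.mem_map, pvOthersB_eq] at hu hu'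
      obtain ⟨m, hm, rfl⟩ := hu
      obtain ⟨t, _, heq⟩ := hu'
      exact (ne_of_mem_pvMutOf hm) ((List.cons.injEq ..).mp heq.symm).1

theorem pvNear_perm (s : List Char) : (pvNear s).Perm (pvMutate s) := by
  rw [List.perm_ext_iff_of_nodup (nodup_pvNear s) (nodup_pvMutate s)]
  intro t
  rw [mem_pvNear, mem_pvMutate]

theorem sum_pvNear_eq (s : List Char) (f : List Char → Int) :
    ((pvNear s).map f).sum = ((pvMutate s).map f).sum :=
  List.Perm.sum_eq (List.Perm.map f (pvNear_perm s))

-- A's check_map lookup equals B's sum of exact counts over the Hamming≤1 neighbourhood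
theorem key_lemma (cl : List Char) (hcl : cl.length < 10 ∨ cl.all pvBase = true)
    (m : List Char) (hm : m.all pvBase = true) :
    (((PySem.List.pyRange 0 ((cl.length : Int) - 9) 1).foldl
        (fun d s =>
          (pvMutate (PySem.List.slice cl (some s) (some (s + 10)))).foldl
            (fun d m => d.modify m 0 (· + 1)) d)
        (PySem.Dict.empty : PySem.Dict (List Char) Int)).getD m 0)
    = ((pvNear m).map (fun v =>
        ((((PySem.List.pyRange 0 ((cl.length : Int) - 9) 1).map
            (fun i => PySem.List.slice cl (some i) (some (i + 10)))).count v : Nat) : Int))).sum := by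
  set win : Int → List Char := fun s => PySem.List.slice cl (some s) (some (s + 10)) with hwin
  set is : List Int := PySem.List.pyRange 0 ((cl.length : Int) - 9) 1 with his
  have hA := getD_A_map win is PySem.Dict.empty m
  calc ((is.foldl (fun d s => (pvMutate (win s)).foldl
          (fun d x => d.modify x 0 (· + 1)) d) PySem.Dict.empty).getD m 0)
      = (is.map (fun s => (((pvMutate (win s)).count m : Nat) : Int))).sum := by
        rw [hA]; simp
    _ = ((is.map win).map (fun w => (((pvMutate w).count m : Nat) : Int))).sum := by
        rw [List.map_map]; rfl
    _ = ((is.map win).map (fun w => (((pvMutate m).count w : Nat) : Int))).sum := by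
        congr 1
        refine List.map_congr_left ?_
        intro w hw
        rcases hcl with hlen | hall
        · exfalso
          have : is = [] := by
            rw [his]
            exact PySem.List.pyRange_one_eq_nil (by omega)
          rw [this] at hw; simp at hw
        · have hwb : w.all pvBase = true := by
            simp only [List.mem_map] at hw
            obtain ⟨s, _, rfl⟩ := hw
            exact all_pvBase_slice hall _ _
          rw [count_pvMutate_symm hwb hm]
    _ = ((pvMutate m).map (fun v => (((is.map win).count v : Nat) : Int))).sum :=
        (sum_count_comm (pvMutate m) (is.map win)).symm
    _ = _ := (sum_pvNear_eq m _).symm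

-- ===== cache shape: A's pySetD fold over range(10, n+1) is B's comprehension over range(1, n+1) =====

theorem map_rule_zeros (f : Int → Int) (m : Nat) (hm : m ≤ 9) :
    (PySem.List.pyRange 1 ((m : Int) + 1) 1).map (fun e => if 10 ≤ e then f e else 0)
      = List.replicate m 0 := by
  induction m with
  | zero => rw [PySem.List.pyRange_one_eq_nil (by norm_num)]; rfl
  | succ j ih =>
    have h1 : ((j + 1 : Nat) : Int) + 1 = ((j : Int) + 1) + 1 := by push_cast; ring
    rw [h1, PySem.List.pyRange_one_succ_right (by omega), List.map_append, ih (by omega)]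
    have h2 : ¬ (10 : Int) ≤ (j : Int) + 1 := by omega
    simp only [List.map_cons, List.map_nil, if_neg h2]
    rw [List.replicate_succ']

theorem fold_step (n : Nat) (f : Int → Int) (j : Nat) (hj : 9 + j ≤ n) :
    (PySem.List.pyRange 10 (10 + (j : Int)) 1).foldl
      (fun cache e => PySem.List.pySetD cache (e - 1) (f e)) (List.replicate n (0 : Int))
    = (PySem.List.pyRange 1 (10 + (j : Int)) 1).map (fun e => if 10 ≤ e then f e else 0)
        ++ List.replicate (n - (9 + j)) 0 := by
  induction j with
  | zero =>
    rw [PySem.List.pyRange_one_eq_nil (by norm_num)]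
    have h9 : ((10 : Int)) = ((9 : Nat) : Int) + 1 := by norm_num
    rw [List.foldl_nil]
    have := map_rule_zeros f 9 (by omega)
    rw [show (10 + (0:Nat) : Int) = ((9:Nat):Int) + 1 by norm_num, this]
    rw [← List.replicate_add]
    congr 1
    omega
  | succ j ih =>
    have hj' : 9 + j ≤ n := by omega
    have hcast : (10 + ((j + 1 : Nat) : Int)) = (10 + (j : Int)) + 1 := by push_cast; ring
    rw [hcast, PySem.List.pyRange_one_succ_right (by omega : (10:Int) ≤ 10 + (j:Int)),
        List.foldl_append, ih hj',
        PySem.List.pyRange_one_succ_right (by omega : (1:Int) ≤ 10 + (j:Int)),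
        List.map_append]
    simp only [List.foldl_cons, List.foldl_nil]
    have hidx : (10 + (j : Int)) - 1 = ((9 + j : Nat) : Int) := by push_cast; ring
    rw [hidx, PySem.List.pySetD_natCast]
    have hlen : ((PySem.List.pyRange 1 (10 + (j : Int)) 1).map
        (fun e => if 10 ≤ e then f e else 0)).length = 9 + j := by
      rw [List.length_map, PySem.List.length_pyRange_one]
      omega
    have hrep : n - (9 + j) = (n - (9 + (j + 1))) + 1 := by omega
    rw [hrep, List.replicate_succ, List.set_append_right _ _ (by omega),
        hlen]
    simp only [Nat.sub_self, List.set_cons_zero]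
    have h10 : (10 : Int) ≤ 10 + (j : Int) := by omega
    simp only [if_pos h10, List.map_cons, List.map_nil]
    rw [List.append_assoc]
    rfl

theorem fold_setD_eq_map (n : Nat) (f : Int → Int) :
    (PySem.List.pyRange 10 ((n : Int) + 1) 1).foldl
      (fun cache e => PySem.List.pySetD cache (e - 1) (f e)) (List.replicate n (0 : Int))
    = (PySem.List.pyRange 1 ((n : Int) + 1) 1).map (fun e => if 10 ≤ e then f e else 0) := by
  by_cases hn : n ≤ 9
  · rw [PySem.List.pyRange_one_eq_nil (by omega), List.foldl_nil,
        map_rule_zeros f n hn]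
  · have h1 : ((n : Int) + 1) = 10 + ((n - 9 : Nat) : Int) := by
      have : ((n - 9 : Nat) : Int) = (n : Int) - 9 := by omega
      omega
    rw [h1, fold_step n f (n - 9) (by omega)]
    have : n - (9 + (n - 9)) = 0 := by omega
    rw [this]
    simp

theorem off_targets_eq_alt (seq : String) (check_seq : String)
    (hpre : (check_seq.toList.length < 10 ∨ check_seq.toList.all pvBase = true) ∧
            (seq.toList.length < 10 ∨ seq.toList.all pvBase = true)) :
    off_targets seq check_seq = off_targets_alt seq check_seq := by
  unfold off_targets off_targets_alt
  dsimp only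
  rw [fold_setD_eq_map seq.toList.length]
  refine List.map_congr_left ?_
  intro e he
  rw [PySem.List.mem_pyRange_one] at he
  by_cases h10 : (10 : Int) ≤ e
  · simp only [if_pos h10]
    have hsl : seq.toList.all pvBase = true := by
      rcases hpre.2 with h | h
      · exfalso; omega
      · exact h
    have hss : (PySem.List.slice seq.toList (some (e - 10)) (some e)).all pvBase = true :=
      all_pvBase_slice hsl _ _
    rw [pvRCB_eq]
    rw [key_lemma check_seq.toList hpre.1 _ hss,
        key_lemma check_seq.toList hpre.1 _ (all_pvBase_pvRC hss)]
  · simp only [if_neg h10]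

-- ===== VERDICT (by name: the statement is the Claim_ definition above) =====
theorem off_targets_spec : Claim_equal_off_targets := by
  intro seq check_seq _ hpre
  unfold Spec_off_targets
  exact off_targets_eq_alt seq check_seq hpre
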